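-- pv_equiv track=rewrite | github.com/MeteoSwiss/pyrad | ci/parse_pyrad_products.py | parameters_to_dict
-- ===== SOURCE A (Python) =====
-- def parameters_to_dict(params):
--     dic = {}
--     params = params.split("\n")
--     key = None
--     for line in params:
--         if ":" in line:
--             key = line.strip()
--             dic[key] = ""
--         else:
--             if key:
--                 dic[key] += line.strip() + " "
--     # keys = re.findall('([a-zA-Z_]*\\s*:\\s*[a-zA-Z]*)', params)
--     # for i in range(len(keys)):
--     #     idx_now = params.index(keys[i]) + len(keys[i])
--     #     if i == len(keys) - 1:
--     #         idx_next = len(params)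
--     #     else:
--     #         idx_next = params.index(keys[i + 1])
--
--     #     dic[keys[i]] = params[idx_now:idx_next]
--     #     if 'quantiles' in keys[i]:
--     #         import pdb; pdb.set_trace()
--     return dic
-- ===== SOURCE B (Python) =====
-- def parameters_to_dict(params):
--     # Group the lines into (key-line, value-block) chunks instead of a one-pass
--     # state machine: drop lines before the first key line, then repeatedly take
--     # the key line and the run of value lines that follows it.
--     lines = params.split("\n")
--     rest = lines
--     while rest and ":" not in rest[0]:
--         rest = rest[1:]
--     dic = {}
--     while rest:
--         key = rest[0].strip()
--         rest = rest[1:]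
--         vals = []
--         while rest and ":" not in rest[0]:
--             vals.append(rest[0].strip() + " ")
--             rest = rest[1:]
--         dic[key] = "".join(vals)
--     return dic
-- ===== Notes on version B (the rewrite author's own statement) =====
-- stated objective: alternative
-- what changed: B replaces A's one-pass state machine (current-key variable with incremental dict string appends) by a grouping decomposition: skip lines before the first key line, then repeatedly take a key line and the run of value lines after it, join that block once and assign it.
import Mathlib
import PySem

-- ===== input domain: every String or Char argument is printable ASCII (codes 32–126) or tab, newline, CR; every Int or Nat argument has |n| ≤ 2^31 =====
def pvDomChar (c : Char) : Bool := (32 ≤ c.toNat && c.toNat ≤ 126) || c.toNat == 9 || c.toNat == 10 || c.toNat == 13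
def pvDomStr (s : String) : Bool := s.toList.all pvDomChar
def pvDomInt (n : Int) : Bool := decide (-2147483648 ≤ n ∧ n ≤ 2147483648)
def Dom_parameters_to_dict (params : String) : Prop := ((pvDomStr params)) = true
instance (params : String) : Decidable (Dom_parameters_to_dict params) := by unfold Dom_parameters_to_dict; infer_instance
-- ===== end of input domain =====

-- B regroups the lines into (key line, following value block) chunks instead of A's
-- one-pass state machine; same result, different decomposition (objective: alternative).

-- ===== PORT A =====
-- A's loop state: (dic, key); Python's `key = None` / `if key:` is encoded as the
-- string "" (falsy exactly like None here: every assigned key contains ':' after strip).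
def pvStepA (st : PySem.Dict String String × String) (line : String) :
    PySem.Dict String String × String :=
  if PySem.Str.isIn ":" line then
    (st.1.insert (PySem.Str.strip line) "", PySem.Str.strip line)
  else
    if st.2 ≠ "" then
      -- dic[key] += line.strip() + " "  (key is always present when st.2 ≠ "", so getD is exact)
      (st.1.insert st.2 (st.1.getD st.2 "" ++ (PySem.Str.strip line ++ " ")), st.2)
    else st

def parameters_to_dict (params : String) : List (String × String) :=
  -- params.split("\n"): sep "\n" ≠ "" so split? is never none
  ((((PySem.Str.split? params "\n").getD []).foldl pvStepA (PySem.Dict.empty, "")).1).items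

-- ===== PORT B =====
def pvNoKey (l : String) : Bool := !(PySem.Str.isIn ":" l)

-- inner while loops of B: take the run of value lines, join them, recurse on the rest
def pvAltGo (d : PySem.Dict String String) : List String → PySem.Dict String String
  | [] => d
  | h :: t =>
    pvAltGo
      (d.insert (PySem.Str.strip h)
        (PySem.Str.join "" ((t.takeWhile pvNoKey).map (fun l => PySem.Str.strip l ++ " "))))
      (t.dropWhile pvNoKey)
  termination_by l => l.length
  decreasing_by exact Nat.lt_succ_of_le (List.length_dropWhile_le _ _)

def parameters_to_dict_alt (params : String) : List (String × String) :=
  -- params.split("\n"): sep "\n" ≠ "" so split? is never none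
  (pvAltGo PySem.Dict.empty (((PySem.Str.split? params "\n").getD []).dropWhile pvNoKey)).items

-- ===== PRECONDITION & SPEC =====
def Spec_parameters_to_dict (params : String) (out : List (String × String)) : Prop := out = parameters_to_dict_alt params
instance (params : String) (out : List (String × String)) : Decidable (Spec_parameters_to_dict params out) := by unfold Spec_parameters_to_dict; infer_instance

-- ===== CLAIM (what is proved, stated in full; the proofs are below) =====
def Claim_equal_parameters_to_dict : Prop := ∀ (params : String), Dom_parameters_to_dict params → Spec_parameters_to_dict params (parameters_to_dict params)

-- ===== LEMMAS AND PROOFS =====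

-- proof-side accumulator: A's fold while a key k with accumulated value v is active
def pvAcc (d : PySem.Dict String String) (k v : String) : List String → PySem.Dict String String
  | [] => d.insert k v
  | h :: t =>
    if pvNoKey h then pvAcc d k (v ++ (PySem.Str.strip h ++ " ")) t
    else pvAltGo (d.insert k v) (h :: t)

theorem pvJoin_nil : PySem.Str.join "" [] = "" := by decide

theorem pvJoin_cons (a : String) (r : List String) :
    PySem.Str.join "" (a :: r) = a ++ PySem.Str.join "" r := by
  cases r with
  | nil => simp [PySem.Str.join, PySem.Chars.join, List.intercalate]
  | cons b t => simp [PySem.Str.join, PySem.Chars.join, List.intercalate, String.ofList_append]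

theorem pvStrip_ne_empty (s : String) (h : PySem.Str.isIn ":" s = true) :
    PySem.Str.strip s ≠ "" := by
  have hm : ':' ∈ s.toList := by
    have h2 := (PySem.Str.isIn_iff_infix ":" s).mp h
    exact h2.subset (by decide)
  intro hc
  have hnil : PySem.Chars.strip s.toList = [] := by
    have := congrArg String.toList hc
    simpa [PySem.Str.strip] using this
  have hsp : PySem.Chars.isspace ':' = true := by
    simp [PySem.Chars.strip, PySem.Chars.rstrip, PySem.Chars.lstrip,
      List.dropWhile_eq_nil_iff] at hnil
    rcases (List.takeWhile_append_dropWhile (p := PySem.Chars.isspace) (l := s.toList)) ▸ hm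
        |> List.mem_append.mp with hl | hr
    · exact List.mem_takeWhile_imp hl
    · exact hnil ':' (by simpa using hr)
  simp [PySem.Chars.isspace] at hsp

-- pvAcc ends exactly like pvAltGo on the current block
theorem pvAcc_eq_altGo (t : List String) :
    ∀ d k v, pvAcc d k v t =
      pvAltGo
        (d.insert k (v ++ PySem.Str.join "" ((t.takeWhile pvNoKey).map (fun l => PySem.Str.strip l ++ " "))))
        (t.dropWhile pvNoKey) := by
  induction t with
  | nil => intro d k v; simp [pvAcc, pvAltGo, pvJoin_nil]
  | cons h t ih =>
    intro d k v
    by_cases hk : pvNoKey h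
    · simp only [pvAcc, hk, if_true, List.takeWhile_cons_of_pos hk,
        List.dropWhile_cons_of_pos hk, List.map_cons, pvJoin_cons, ih]
      rw [String.append_assoc]
    · simp only [pvAcc, hk, if_false, List.takeWhile_cons_of_neg (by simpa using hk),
        List.dropWhile_cons_of_neg (by simpa using hk), List.map_nil, pvJoin_nil,
        String.append_empty, Bool.false_eq_true]

-- A's fold with an active key k (value v accumulated so far) is pvAcc
theorem pvFold_some (ls : List String) :
    ∀ d k v, k ≠ "" →
      (ls.foldl pvStepA (d.insert k v, k)).1 = pvAcc d k v ls := by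
  induction ls with
  | nil => intro d k v _; simp [pvAcc]
  | cons h t ih =>
    intro d k v hk
    by_cases hkey : PySem.Str.isIn ":" h = true
    · have hkc : PySem.Chars.isIn [':'] h.toList = true := by simpa using hkey
      have hk' := pvStrip_ne_empty h hkey
      have : pvStepA (d.insert k v, k) h =
          ((d.insert k v).insert (PySem.Str.strip h) "", PySem.Str.strip h) := by
        simp [pvStepA, hkc]
      rw [List.foldl_cons, this, ih _ _ _ hk', pvAcc_eq_altGo]
      have hnk : pvNoKey h = false := by simp [pvNoKey, hkc]
      simp only [pvAcc, hnk, Bool.false_eq_true, if_false, pvAltGo, String.empty_append]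
    · have hkc : PySem.Chars.isIn [':'] h.toList = false := by
        simpa using (Bool.of_not_eq_true hkey)
      have hnk : pvNoKey h = true := by simp [pvNoKey, hkc]
      have : pvStepA (d.insert k v, k) h =
          (d.insert k (v ++ (PySem.Str.strip h ++ " ")), k) := by
        simp [pvStepA, hkc, hk, PySem.Dict.getD_insert_self, PySem.Dict.insert_insert_self]
      rw [List.foldl_cons, this, ih _ _ _ hk]
      simp [pvAcc, hnk]

-- A's fold with no key yet skips value lines, i.e. is pvAltGo after dropWhile
theorem pvFold_none (ls : List String) :
    ∀ d, (ls.foldl pvStepA (d, "")).1 = pvAltGo d (ls.dropWhile pvNoKey) := by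
  induction ls with
  | nil => intro d; simp [pvAltGo]
  | cons h t ih =>
    intro d
    by_cases hkey : PySem.Str.isIn ":" h = true
    · have hkc : PySem.Chars.isIn [':'] h.toList = true := by simpa using hkey
      have hk' := pvStrip_ne_empty h hkey
      have hstep : pvStepA (d, "") h =
          (d.insert (PySem.Str.strip h) "", PySem.Str.strip h) := by
        simp [pvStepA, hkc]
      have hnk : pvNoKey h = false := by simp [pvNoKey, hkc]
      rw [List.foldl_cons, hstep, pvFold_some t _ _ _ hk', pvAcc_eq_altGo,
        List.dropWhile_cons_of_neg (by simp [hnk])]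
      simp only [pvAltGo, String.empty_append]
    · have hkc : PySem.Chars.isIn [':'] h.toList = false := by
        simpa using (Bool.of_not_eq_true hkey)
      have hnk : pvNoKey h = true := by simp [pvNoKey, hkc]
      have hstep : pvStepA (d, "") h = (d, "") := by simp [pvStepA, hkc]
      rw [List.foldl_cons, hstep, ih, List.dropWhile_cons_of_pos hnk]

-- ===== VERDICT (by name: the statement is the Claim_ definition above) =====
theorem parameters_to_dict_spec : Claim_equal_parameters_to_dict := by
  intro params _
  unfold Spec_parameters_to_dict parameters_to_dict parameters_to_dict_alt
  rw [pvFold_none]
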